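-- pv_equiv track=rewrite | github.com/OCA/odoorpc | odoorpc/fields.py | tuples2ids
-- ===== SOURCE A (Python) =====
-- def tuples2ids(tuples, ids):
--     """Update `ids` according to `tuples`, e.g. (3, 0, X), (4, 0, X)..."""
--     for value in tuples:
--         if value[0] == 6 and value[2]:
--             ids = value[2]
--         elif value[0] == 5:
--             ids[:] = []
--         elif value[0] == 4 and value[1] and value[1] not in ids:
--             ids.append(value[1])
--         elif value[0] == 3 and value[1] and value[1] in ids:
--             ids.remove(value[1])
--     return ids
-- ===== SOURCE B (Python) =====
-- def tuples2ids(tuples, ids):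
--     """Update `ids` according to `tuples`, e.g. (3, 0, X), (4, 0, X)..."""
--     # Keep an append-only sequence `seq`,
--     # a count of occurrences `cnt`, and lazy first-occurrence removals `rem`.
--     seq = list(ids)
--     cnt = {}
--     for v in seq:
--         cnt[v] = cnt.get(v, 0) + 1
--     rem = {}
--     for value in tuples:
--         op, arg = value[0], value[1]
--         if op == 6 and value[2]:
--             seq = list(value[2])
--             cnt = {}
--             for v in seq:
--                 cnt[v] = cnt.get(v, 0) + 1
--             rem = {}
--         elif op == 5:
--             seq = []
--             cnt = {}
--             rem = {}
--         elif op == 4 and arg and cnt.get(arg, 0) - rem.get(arg, 0) <= 0: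
--             seq.append(arg)
--             cnt[arg] = cnt.get(arg, 0) + 1
--         elif op == 3 and arg and cnt.get(arg, 0) - rem.get(arg, 0) > 0:
--             rem[arg] = rem.get(arg, 0) + 1
--     out = []
--     for v in seq:
--         r = rem.get(v, 0)
--         if r > 0:
--             rem[v] = r - 1
--         else:
--             out.append(v)
--     return out
-- ===== Notes on version B (the rewrite author's own statement) =====
-- stated objective: alternative
-- what changed: Replaces the per-command linear membership test and list.remove scan by an append-only sequence with occurrence counts and a lazy first-occurrence-removal counter, materialising the result in one final pass.
import Mathlib
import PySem

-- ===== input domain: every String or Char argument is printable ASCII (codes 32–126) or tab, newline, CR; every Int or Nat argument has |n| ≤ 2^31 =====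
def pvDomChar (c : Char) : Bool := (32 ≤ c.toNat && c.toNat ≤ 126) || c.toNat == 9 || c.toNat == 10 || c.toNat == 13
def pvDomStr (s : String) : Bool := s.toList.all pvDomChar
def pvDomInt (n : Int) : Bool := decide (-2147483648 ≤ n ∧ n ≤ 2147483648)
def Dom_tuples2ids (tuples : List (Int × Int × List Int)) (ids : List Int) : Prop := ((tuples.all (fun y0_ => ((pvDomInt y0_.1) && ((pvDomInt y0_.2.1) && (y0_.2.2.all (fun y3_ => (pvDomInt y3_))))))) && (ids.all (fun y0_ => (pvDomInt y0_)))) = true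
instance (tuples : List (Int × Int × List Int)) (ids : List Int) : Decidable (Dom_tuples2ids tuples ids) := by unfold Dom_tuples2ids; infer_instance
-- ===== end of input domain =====

-- B replaces A's per-command membership/remove list scans by occurrence counts plus
-- lazy first-occurrence removals applied in one final pass; the equivalence proved is
-- about the RETURN value only (Python A mutates `ids` in place, B does not).

-- ===== PORT A =====
-- loop body of A (branches in A's order; ids.remove is guarded by membership)
def pvAStep (ids : List Int) (value : Int × Int × List Int) : List Int :=
  if value.1 = 6 ∧ value.2.2 ≠ [] then value.2.2
  else if value.1 = 5 then []
  else if value.1 = 4 ∧ value.2.1 ≠ 0 ∧ value.2.1 ∉ ids then ids ++ [value.2.1]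
  else if value.1 = 3 ∧ value.2.1 ≠ 0 ∧ value.2.1 ∈ ids then
    (PySem.List.remove? ids value.2.1).getD ids
  else ids

def tuples2ids (tuples : List (Int × Int × List Int)) (ids : List Int) : List Int :=
  tuples.foldl pvAStep ids

-- ===== PORT B =====
-- Source B's counting loop `for v in seq: cnt[v] = cnt.get(v,0)+1`
def pvCount (xs : List Int) : PySem.Dict Int Int :=
  xs.foldl (fun cnt v => cnt.insert v (cnt.getD v 0 + 1)) PySem.Dict.empty

-- Source B's loop body: state (seq, cnt, rem)
def pvBStep (st : List Int × PySem.Dict Int Int × PySem.Dict Int Int)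
    (value : Int × Int × List Int) : List Int × PySem.Dict Int Int × PySem.Dict Int Int :=
  if value.1 = 6 ∧ value.2.2 ≠ [] then (value.2.2, pvCount value.2.2, PySem.Dict.empty)
  else if value.1 = 5 then ([], PySem.Dict.empty, PySem.Dict.empty)
  else if value.1 = 4 ∧ value.2.1 ≠ 0 ∧ st.2.1.getD value.2.1 0 - st.2.2.getD value.2.1 0 ≤ 0 then
    (st.1 ++ [value.2.1], st.2.1.insert value.2.1 (st.2.1.getD value.2.1 0 + 1), st.2.2)
  else if value.1 = 3 ∧ value.2.1 ≠ 0 ∧ st.2.1.getD value.2.1 0 - st.2.2.getD value.2.1 0 > 0 then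
    (st.1, st.2.1, st.2.2.insert value.2.1 (st.2.2.getD value.2.1 0 + 1))
  else st

-- Source B's final loop: emit seq, consuming pending first-occurrence removals
def pvExtract : List Int → PySem.Dict Int Int → List Int
  | [], _ => []
  | v :: rest, rem =>
    let r := rem.getD v 0
    if r > 0 then pvExtract rest (rem.insert v (r - 1))
    else v :: pvExtract rest rem

def tuples2ids_alt (tuples : List (Int × Int × List Int)) (ids : List Int) : List Int :=
  let st := tuples.foldl pvBStep (ids, pvCount ids, PySem.Dict.empty)
  pvExtract st.1 st.2.2

-- ===== PRECONDITION & SPEC =====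
def Spec_tuples2ids (tuples : List (Int × Int × List Int)) (ids : List Int) (out : List Int) : Prop := out = tuples2ids_alt tuples ids
instance (tuples : List (Int × Int × List Int)) (ids : List Int) (out : List Int) : Decidable (Spec_tuples2ids tuples ids out) := by unfold Spec_tuples2ids; infer_instance

-- ===== CLAIM (what is proved, stated in full; the proofs are below) =====
def Claim_equal_tuples2ids : Prop := ∀ (tuples : List (Int × Int × List Int)) (ids : List Int), Dom_tuples2ids tuples ids → Spec_tuples2ids tuples ids (tuples2ids tuples ids)

-- ===== LEMMAS AND PROOFS =====

-- pvExtract abstracted over rem's lookup function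
def pvExtractF : List Int → (Int → Int) → List Int
  | [], _ => []
  | v :: rest, f =>
    if f v > 0 then pvExtractF rest (Function.update f v (f v - 1))
    else v :: pvExtractF rest f

theorem pvExtract_eq_F (seq : List Int) (rem : PySem.Dict Int Int) :
    pvExtract seq rem = pvExtractF seq (fun v => rem.getD v 0) := by
  induction seq generalizing rem with
  | nil => rfl
  | cons v rest ih =>
    simp only [pvExtract, pvExtractF]
    split
    · rw [ih]
      congr 1
      funext w
      simp [PySem.Dict.getD_insert, Function.update_apply]
    · rw [ih]

theorem pvExtractF_id (seq : List Int) (f : Int → Int) (h : ∀ v, ¬ f v > 0) :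
    pvExtractF seq f = seq := by
  induction seq with
  | nil => rfl
  | cons v rest ih => simp [pvExtractF, h v, ih]

theorem pvExtractF_append (seq : List Int) (f : Int → Int) (v : Int)
    (h : f v ≤ (seq.count v : Int)) :
    pvExtractF (seq ++ [v]) f = pvExtractF seq f ++ [v] := by
  induction seq generalizing f with
  | nil =>
    simp only [List.count_nil, Nat.cast_zero] at h
    simp [pvExtractF, show ¬ f v > 0 by omega]
  | cons u rest ih =>
    simp only [List.cons_append, pvExtractF]
    by_cases hvu : v = u
    · subst hvu
      rw [List.count_cons_self] at h
      push_cast at h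
      by_cases hpos : f v > 0
      · rw [if_pos hpos, if_pos hpos,
          ih (Function.update f v (f v - 1)) (by rw [Function.update_self]; omega)]
      · rw [if_neg hpos, if_neg hpos, ih f (by omega), List.cons_append]
    · have huv : u ≠ v := fun h' => hvu h'.symm
      rw [List.count_cons_of_ne huv] at h
      by_cases hpos : f u > 0
      · rw [if_pos hpos, if_pos hpos,
          ih (Function.update f u (f u - 1)) (by rw [Function.update_apply, if_neg hvu]; exact h)]
      · rw [if_neg hpos, if_neg hpos, ih f h, List.cons_append]

theorem pvExtractF_count (seq : List Int) (f : Int → Int) (v : Int)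
    (h0 : 0 ≤ f v) (h1 : f v ≤ (seq.count v : Int)) :
    ((pvExtractF seq f).count v : Int) = (seq.count v : Int) - f v := by
  induction seq generalizing f with
  | nil =>
    simp only [List.count_nil, Nat.cast_zero] at h1 ⊢
    simp [pvExtractF]
    omega
  | cons u rest ih =>
    simp only [pvExtractF]
    by_cases hvu : v = u
    · subst hvu
      rw [List.count_cons_self] at h1
      push_cast at h1
      by_cases hpos : f v > 0
      · rw [if_pos hpos,
          ih (Function.update f v (f v - 1)) (by rw [Function.update_self]; omega)
            (by rw [Function.update_self]; omega),
          Function.update_self, List.count_cons_self]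
        push_cast
        omega
      · rw [if_neg hpos, List.count_cons_self, List.count_cons_self]
        push_cast
        rw [ih f h0 (by omega)]
        omega
    · have huv : u ≠ v := fun h' => hvu h'.symm
      rw [List.count_cons_of_ne huv] at h1
      by_cases hpos : f u > 0
      · rw [if_pos hpos,
          ih (Function.update f u (f u - 1))
            (by rw [Function.update_apply, if_neg hvu]; exact h0)
            (by rw [Function.update_apply, if_neg hvu]; exact h1),
          Function.update_apply, if_neg hvu, List.count_cons_of_ne huv]
      · rw [if_neg hpos, List.count_cons_of_ne huv, List.count_cons_of_ne huv,
          ih f h0 h1]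

theorem pvExtractF_erase (seq : List Int) (f : Int → Int) (v : Int)
    (h0 : 0 ≤ f v) (h1 : f v < (seq.count v : Int)) :
    (pvExtractF seq f).erase v = pvExtractF seq (Function.update f v (f v + 1)) := by
  induction seq generalizing f with
  | nil =>
    simp only [List.count_nil, Nat.cast_zero] at h1
    omega
  | cons u rest ih =>
    simp only [pvExtractF]
    by_cases hvu : v = u
    · subst hvu
      rw [List.count_cons_self] at h1
      push_cast at h1
      by_cases hpos : f v > 0
      · rw [if_pos hpos, if_pos (by rw [Function.update_self]; omega),
          ih (Function.update f v (f v - 1)) (by rw [Function.update_self]; omega)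
            (by rw [Function.update_self]; omega)]
        congr 1
        funext w
        by_cases hw : w = v
        · subst hw; simp [Function.update_self]
        · simp [hw]
      · rw [if_neg hpos, if_pos (by rw [Function.update_self]; omega),
          List.erase_cons_head]
        congr 1
        funext w
        by_cases hw : w = v
        · subst hw; simp [Function.update_self]
        · simp [hw]
    · have huv : u ≠ v := fun h' => hvu h'.symm
      rw [List.count_cons_of_ne huv] at h1
      have hgu : Function.update f v (f v + 1) u = f u := by
        rw [Function.update_apply, if_neg huv]
      by_cases hpos : f u > 0
      · rw [if_pos hpos, if_pos (by rw [hgu]; exact hpos),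
          ih (Function.update f u (f u - 1))
            (by rw [Function.update_apply, if_neg hvu]; exact h0)
            (by rw [Function.update_apply, if_neg hvu]; exact h1)]
        congr 1
        funext w
        simp only [Function.update_apply]
        split_ifs <;> simp_all
      · rw [if_neg hpos, if_neg (by rw [hgu]; exact hpos),
          List.erase_cons_tail (by simp [huv]), ih f h0 h1]

theorem pvExtractF_mem (seq : List Int) (f : Int → Int) (v : Int)
    (h0 : 0 ≤ f v) (h1 : f v ≤ (seq.count v : Int)) :
    v ∈ pvExtractF seq f ↔ f v < (seq.count v : Int) := by
  rw [← List.count_pos_iff]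
  have := pvExtractF_count seq f v h0 h1
  omega

-- the loop invariant tying A's ids to B's (seq, cnt, rem) state
def pvInv (a : List Int) (st : List Int × PySem.Dict Int Int × PySem.Dict Int Int) : Prop :=
  a = pvExtractF st.1 (fun v => st.2.2.getD v 0) ∧
  (∀ v, st.2.1.getD v 0 = (st.1.count v : Int)) ∧
  (∀ v, 0 ≤ st.2.2.getD v 0 ∧ st.2.2.getD v 0 ≤ (st.1.count v : Int))

theorem pvCount_getD (xs : List Int) (v : Int) :
    (pvCount xs).getD v 0 = (xs.count v : Int) := by
  unfold pvCount
  rw [PySem.Dict.getD_foldl_insert_add_one]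
  simp [PySem.Dict.getD_empty]

theorem pvInv_init (ids : List Int) : pvInv ids (ids, pvCount ids, PySem.Dict.empty) := by
  refine ⟨?_, fun v => pvCount_getD ids v,
    fun v => ⟨by simp [PySem.Dict.getD_empty], by simp [PySem.Dict.getD_empty]⟩⟩
  rw [pvExtractF_id _ _ (by simp [PySem.Dict.getD_empty])]

theorem pvInv_step (a : List Int) (st : List Int × PySem.Dict Int Int × PySem.Dict Int Int)
    (value : Int × Int × List Int) (h : pvInv a st) :
    pvInv (pvAStep a value) (pvBStep st value) := by
  obtain ⟨seq, cnt, rem⟩ := st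
  obtain ⟨op, arg, lst⟩ := value
  obtain ⟨hA, hC, hR⟩ := h
  simp only at hA hC hR
  simp only [pvAStep, pvBStep]
  by_cases h6 : op = 6 ∧ lst ≠ []
  · rw [if_pos h6, if_pos h6]
    exact pvInv_init lst
  rw [if_neg h6, if_neg h6]
  by_cases h5 : op = 5
  · rw [if_pos h5, if_pos h5]
    exact pvInv_init []
  rw [if_neg h5, if_neg h5]
  have hmem : arg ∈ a ↔ cnt.getD arg 0 - rem.getD arg 0 > 0 := by
    rw [hA, pvExtractF_mem seq _ arg (hR arg).1 (hR arg).2, hC arg]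
    omega
  by_cases h4 : op = 4 ∧ arg ≠ 0 ∧ arg ∉ a
  · have h4' : op = 4 ∧ arg ≠ 0 ∧ cnt.getD arg 0 - rem.getD arg 0 ≤ 0 := by
      refine ⟨h4.1, h4.2.1, ?_⟩
      have hna := h4.2.2
      rw [hmem] at hna
      omega
    rw [if_pos h4, if_pos h4']
    refine ⟨?_, fun w => ?_, fun w => ?_⟩
    · simp only
      rw [hA, pvExtractF_append seq _ arg (hR arg).2]
    · simp only [PySem.Dict.getD_insert, List.count_append]
      by_cases hw : w = arg
      · subst hw
        rw [if_pos rfl, hC w, List.count_cons_self, List.count_nil]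
        push_cast
        omega
      · rw [if_neg hw, hC w,
          List.count_cons_of_ne (fun h' => hw h'.symm), List.count_nil]
        omega
    · simp only [List.count_append]
      have hRw := hR w
      push_cast
      omega
  · have h4' : ¬ (op = 4 ∧ arg ≠ 0 ∧ cnt.getD arg 0 - rem.getD arg 0 ≤ 0) := by
      intro hc
      apply h4
      refine ⟨hc.1, hc.2.1, ?_⟩
      rw [hmem]
      omega
    rw [if_neg h4, if_neg h4']
    by_cases h3 : op = 3 ∧ arg ≠ 0 ∧ arg ∈ a
    · have h3' : op = 3 ∧ arg ≠ 0 ∧ cnt.getD arg 0 - rem.getD arg 0 > 0 :=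
        ⟨h3.1, h3.2.1, hmem.mp h3.2.2⟩
      rw [if_pos h3, if_pos h3']
      have hlt : rem.getD arg 0 < (seq.count arg : Int) := by
        have hgt := h3'.2.2
        rw [hC arg] at hgt
        omega
      refine ⟨?_, hC, fun w => ?_⟩
      · simp only
        rw [PySem.List.remove?_eq_some_erase a arg h3.2.2, Option.getD_some, hA,
          pvExtractF_erase seq _ arg (hR arg).1 hlt]
        congr 1
        funext w
        simp [PySem.Dict.getD_insert, Function.update_apply]
      · simp only [PySem.Dict.getD_insert]
        by_cases hw : w = arg
        · have hRa := hR w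
          subst hw
          rw [if_pos rfl]
          omega
        · rw [if_neg hw]
          exact hR w
    · have h3' : ¬ (op = 3 ∧ arg ≠ 0 ∧ cnt.getD arg 0 - rem.getD arg 0 > 0) := by
        intro hc
        exact h3 ⟨hc.1, hc.2.1, hmem.mpr hc.2.2⟩
      rw [if_neg h3, if_neg h3']
      exact ⟨hA, hC, hR⟩

theorem pvInv_foldl (tuples : List (Int × Int × List Int)) (a : List Int)
    (st : List Int × PySem.Dict Int Int × PySem.Dict Int Int) (h : pvInv a st) :
    pvInv (tuples.foldl pvAStep a) (tuples.foldl pvBStep st) := by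
  induction tuples generalizing a st with
  | nil => exact h
  | cons t rest ih => exact ih _ _ (pvInv_step a st t h)

-- ===== VERDICT (by name: the statement is the Claim_ definition above) =====
theorem tuples2ids_spec : Claim_equal_tuples2ids := by
  intro tuples ids _
  unfold Spec_tuples2ids tuples2ids tuples2ids_alt
  have h := pvInv_foldl tuples ids (ids, pvCount ids, PySem.Dict.empty) (pvInv_init ids)
  rw [h.1, pvExtract_eq_F]
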